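-- pv_equiv track=rewrite | github.com/mmarfeo/iaFacturas | app/services/pdf_toolkit.py | _rango_hojas
-- ===== SOURCE A (Python) =====
-- def _rango_hojas(total: int, mode: str, start_1: int, end_1: int) -> list[int]:
--     if total <= 0:
--         raise ValueError("El PDF no tiene páginas.")
--     if mode == "all":
--         return list(range(total))
--     s = max(1, start_1)
--     e = max(1, end_1)
--     if s > e:
--         s, e = e, s
--     indices = [i for i in range(total) if s <= i + 1 <= e]
--     if not indices:
--         raise ValueError(
--             f"El rango {s}–{e} no incluye ninguna página válida "
--             f"(el documento tiene {total} página(s))."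
--         )
--     return indices
-- ===== SOURCE B (Python) =====
-- def _rango_hojas(total: int, mode: str, start_1: int, end_1: int) -> list[int]:
--     if total <= 0:
--         raise ValueError("El PDF no tiene páginas.")
--     if mode == "all":
--         return list(range(total))
--     s = max(1, min(start_1, end_1))
--     e = max(1, max(start_1, end_1))
--     pages = list(range(s - 1, min(e, total)))
--     if not pages:
--         raise ValueError(
--             f"El rango {s}–{e} no incluye ninguna página válida "
--             f"(el documento tiene {total} página(s))."
--         )
--     return pages
-- ===== Notes on version B (the rewrite author's own statement) =====
-- stated objective: alternative
-- what changed: B replaces A's swap-branch plus per-page filter over range(total) with a branch-free min/max window: lo = max(1, min(start,end)) - 1, hi = min(max(1, max(start,end)), total), returning range(lo, hi) directly.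
-- outside the precondition, e.g. on _rango_hojas(0, 'all', 1, 1): A raises ValueError, B raises ValueError; on _rango_hojas(3, 'x', 5, 7): A raises ValueError, B raises ValueError
import Mathlib
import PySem

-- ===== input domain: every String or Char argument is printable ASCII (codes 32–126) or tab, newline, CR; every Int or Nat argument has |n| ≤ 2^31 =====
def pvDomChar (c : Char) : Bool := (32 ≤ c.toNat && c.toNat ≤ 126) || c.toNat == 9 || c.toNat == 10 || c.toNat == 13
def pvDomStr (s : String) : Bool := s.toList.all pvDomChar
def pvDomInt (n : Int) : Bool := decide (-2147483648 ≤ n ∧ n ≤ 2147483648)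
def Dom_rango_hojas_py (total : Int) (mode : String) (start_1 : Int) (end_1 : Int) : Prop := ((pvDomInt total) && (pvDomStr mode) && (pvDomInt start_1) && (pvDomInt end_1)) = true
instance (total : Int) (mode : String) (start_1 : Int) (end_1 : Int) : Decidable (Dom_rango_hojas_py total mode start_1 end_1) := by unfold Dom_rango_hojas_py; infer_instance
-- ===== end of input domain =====

-- B computes the answer window branch-free via min/max instead of A's swap branch and per-page filter (alternative decomposition; same ordered result).

-- ===== PORT A =====
def rango_hojas_py (total : Int) (mode : String) (start_1 : Int) (end_1 : Int) : List Int :=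
  if total ≤ 0 then []  -- Python raises ValueError here; excluded by Pre_
  else if mode = "all" then PySem.List.pyRange 0 total 1
  else
    let s0 := max 1 start_1
    let e0 := max 1 end_1
    let s := if s0 > e0 then e0 else s0
    let e := if s0 > e0 then s0 else e0
    let indices := (PySem.List.pyRange 0 total 1).filter
      (fun i => decide (s ≤ i + 1) && decide (i + 1 ≤ e))
    indices  -- if indices = [], Python raises ValueError; excluded by Pre_

-- ===== PORT B =====
def rango_hojas_py_alt (total : Int) (mode : String) (start_1 : Int) (end_1 : Int) : List Int :=
  if total ≤ 0 then []  -- Python raises ValueError here; excluded by Pre_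
  else if mode = "all" then PySem.List.pyRange 0 total 1
  else
    PySem.List.pyRange (max 1 (min start_1 end_1) - 1)
      (min (max 1 (max start_1 end_1)) total) 1
    -- if this window is empty, Python raises ValueError; excluded by Pre_

-- ===== PRECONDITION & SPEC =====
-- Pre_ excludes exactly the inputs where the Python A raises ValueError: total ≤ 0, or
-- (mode ≠ "all" and) the clamped-and-swapped 1-based window starts past the last page.
def Pre_rango_hojas_py (total : Int) (mode : String) (start_1 : Int) (end_1 : Int) : Prop :=
  0 < total ∧ (mode = "all" ∨ max 1 (min start_1 end_1) ≤ total)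
instance (total : Int) (mode : String) (start_1 : Int) (end_1 : Int) : Decidable (Pre_rango_hojas_py total mode start_1 end_1) := by unfold Pre_rango_hojas_py; infer_instance

def pvWitness_rango_hojas_py : Int × String × Int × Int := (5, "pages", 2, 4)

def Spec_rango_hojas_py (total : Int) (mode : String) (start_1 : Int) (end_1 : Int) (out : List Int) : Prop := out = rango_hojas_py_alt total mode start_1 end_1
instance (total : Int) (mode : String) (start_1 : Int) (end_1 : Int) (out : List Int) : Decidable (Spec_rango_hojas_py total mode start_1 end_1 out) := by unfold Spec_rango_hojas_py; infer_instance

-- ===== CLAIM (what is proved, stated in full; the proofs are below) =====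
def Claim_equal_rango_hojas_py : Prop := ∀ (total : Int) (mode : String) (start_1 : Int) (end_1 : Int), Dom_rango_hojas_py total mode start_1 end_1 → Pre_rango_hojas_py total mode start_1 end_1 → Spec_rango_hojas_py total mode start_1 end_1 (rango_hojas_py total mode start_1 end_1)

-- ===== LEMMAS AND PROOFS =====

-- Filtering range(0, b) by 's ≤ i+1 ≤ e' yields the contiguous window range(max a (s-1), min b e).
lemma filter_pyRange_window (s e : Int) : ∀ (n : Nat) (a b : Int), (b - a).toNat = n →
    (PySem.List.pyRange a b 1).filter (fun i => decide (s ≤ i + 1) && decide (i + 1 ≤ e))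
      = PySem.List.pyRange (max a (s - 1)) (min b e) 1 := by
  intro n
  induction n with
  | zero =>
    intro a b h
    have hba : b ≤ a := by omega
    rw [PySem.List.pyRange_one_eq_nil hba, PySem.List.pyRange_one_eq_nil (by omega : min b e ≤ max a (s - 1))]
    simp
  | succ k ih =>
    intro a b h
    have hab : a < b := by omega
    rw [PySem.List.pyRange_one_cons hab, List.filter_cons]
    by_cases hkeep : s ≤ a + 1 ∧ a + 1 ≤ e
    · have hc : (decide (s ≤ a + 1) && decide (a + 1 ≤ e)) = true := by
        simp [hkeep.1, hkeep.2]
      rw [hc]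
      simp only [if_true]
      have hmax : max a (s - 1) = a := by omega
      have hlt : a < min b e := by omega
      rw [hmax, PySem.List.pyRange_one_cons hlt]
      have h2 : max (a + 1) (s - 1) = a + 1 := by omega
      rw [ih (a + 1) b (by omega), h2]
    · have hc : (decide (s ≤ a + 1) && decide (a + 1 ≤ e)) = false := by
        rcases (not_and_or.mp hkeep) with h1 | h1 <;> simp [h1]
      rw [hc]
      simp only [Bool.false_eq_true, if_false]
      rw [ih (a + 1) b (by omega)]
      rcases not_and_or.mp hkeep with h1 | h1
      · have : max a (s - 1) = s - 1 := by omega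
        have h2 : max (a + 1) (s - 1) = s - 1 := by omega
        rw [this, h2]
      · rw [PySem.List.pyRange_one_eq_nil (by omega : min b e ≤ max (a + 1) (s - 1)),
            PySem.List.pyRange_one_eq_nil (by omega : min b e ≤ max a (s - 1))]

-- ===== VERDICT (by name: the statement is the Claim_ definition above) =====
theorem rango_hojas_py_spec : Claim_equal_rango_hojas_py := by
  intro total mode start_1 end_1 _hdom hpre
  obtain ⟨hpos, hrest⟩ := hpre
  unfold Spec_rango_hojas_py rango_hojas_py rango_hojas_py_alt
  rw [if_neg (by omega : ¬ total ≤ 0), if_neg (by omega : ¬ total ≤ 0)]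
  by_cases hall : mode = "all"
  · rw [if_pos hall, if_pos hall]
  · rw [if_neg hall, if_neg hall]
    have hlo : max 1 (min start_1 end_1) ≤ total := by
      rcases hrest with h | h
      · exact absurd h hall
      · exact h
    simp only []
    set s0 := max 1 start_1 with hs0
    set e0 := max 1 end_1 with he0
    by_cases hswap : s0 > e0
    · simp only [if_pos hswap]
      rw [filter_pyRange_window e0 s0 (total - 0).toNat 0 total (by rfl)]
      congr 1 <;> omega
    · simp only [if_neg hswap]
      rw [filter_pyRange_window s0 e0 (total - 0).toNat 0 total (by rfl)]
      congr 1 <;> omega
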